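-- pv_equiv track=rewrite | github.com/awslabs/hybrid-model-factory | training/src/hmf/data/filter.py | _has_word_repetition
-- ===== SOURCE A (Python) =====
-- from collections import Counter
--
-- def _has_word_repetition(text: str, ngram_size: int, max_repeats: int, window_size: int = 0) -> bool:
--     """Check for repeated word n-grams within sliding window."""
--     words = text.split()
--     if len(words) < ngram_size:
--         return False
--
--     ngrams = [tuple(words[i:i + ngram_size]) for i in range(len(words) - ngram_size + 1)]
--
--     # No window - check globally
--     if window_size <= 0 or window_size >= len(ngrams):
--         counts: dict[tuple[str, ...], int] = {}
--         for ngram in ngrams: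
--             count = counts.get(ngram, 0) + 1
--             if count > max_repeats:
--                 return True
--             counts[ngram] = count
--         return False
--
--     # Sliding window
--     window = Counter(ngrams[:window_size])
--     if max(window.values()) > max_repeats:
--         return True
--
--     for i in range(window_size, len(ngrams)):
--         old = ngrams[i - window_size]
--         window[old] -= 1
--         if window[old] == 0:
--             del window[old]
--
--         new = ngrams[i]
--         window[new] += 1
--         if window[new] > max_repeats:
--             return True
--
--     return False
-- ===== SOURCE B (Python) =====
-- from collections import Counter
--
--
-- def _has_word_repetition(text: str, ngram_size: int, max_repeats: int, window_size: int = 0) -> bool: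
--     """Check for repeated word n-grams within sliding window (declarative rewrite)."""
--     words = text.split()
--     if len(words) < ngram_size:
--         return False
--     ngrams = [tuple(words[i:i + ngram_size]) for i in range(len(words) - ngram_size + 1)]
--     n = len(ngrams)
--     if 0 < window_size < n:
--         spans = [ngrams[s:s + window_size] for s in range(n - window_size + 1)]
--     else:
--         spans = [ngrams]
--     return any(max(Counter(span).values()) > max_repeats for span in spans)
-- ===== Notes on version B (the rewrite author's own statement) =====
-- stated objective: simpler
-- what changed: A maintains an incremental sliding Counter with in-place decrements/deletions and early returns; B declaratively materialises every window slice and returns any(max(Counter(span).values()) > max_repeats), one Counter built per window.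
import Mathlib
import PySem

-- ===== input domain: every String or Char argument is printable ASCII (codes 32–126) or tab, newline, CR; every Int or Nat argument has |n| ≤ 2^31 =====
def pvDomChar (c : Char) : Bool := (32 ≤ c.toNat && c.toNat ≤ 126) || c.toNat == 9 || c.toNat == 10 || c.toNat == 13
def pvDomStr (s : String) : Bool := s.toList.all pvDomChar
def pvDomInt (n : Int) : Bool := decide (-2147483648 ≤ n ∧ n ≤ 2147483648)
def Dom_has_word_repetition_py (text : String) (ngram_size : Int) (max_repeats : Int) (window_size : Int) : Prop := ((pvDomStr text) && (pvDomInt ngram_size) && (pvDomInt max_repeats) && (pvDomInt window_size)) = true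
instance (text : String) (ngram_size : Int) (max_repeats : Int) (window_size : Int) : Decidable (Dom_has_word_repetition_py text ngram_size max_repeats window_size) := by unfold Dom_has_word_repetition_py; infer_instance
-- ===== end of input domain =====

-- B replaces A's incremental sliding-counter loops (with early returns and in-place
-- Counter updates) by a declarative rewrite: build every window slice and test
-- any(max(Counter(span).values()) > max_repeats); objective: simpler, not faster.

-- ===== PORT A =====

-- shared with port B: `ngrams = [tuple(words[i:i+ngram_size]) for i in range(len(words)-ngram_size+1)]`
-- (this comprehension is literally the same line in both Pythons)
def pvNgrams (words : List String) (ngram_size : Int) : List (List String) :=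
  (PySem.List.pyRange 0 (PySem.List.len words - ngram_size + 1) 1).map
    (fun i => PySem.List.slice words (some i) (some (i + ngram_size)))

-- shared with port B: `max(<values>) > max_repeats` (max() of an empty sequence raises
-- ValueError; both programs only ever apply it to nonempty value lists, so the `none`
-- arm is unreachable)
def pvMaxGt (vals : List Int) (m : Int) : Bool :=
  match PySem.List.max? vals (fun v => v) with
  | none => false
  | some v => decide (m < v)

-- A's global loop: `for ngram in ngrams: count = counts.get(ngram, 0) + 1; if count > max_repeats: return True; counts[ngram] = count`
def pvAGlobal (m : Int) : List (List String) → PySem.Dict (List String) Int → Bool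
  | [], _ => false
  | g :: rest, counts =>
      let c := counts.getD g 0 + 1
      if m < c then true else pvAGlobal m rest (counts.insert g c)

-- A's sliding loop: `for i in range(window_size, len(ngrams)): ...`
-- (`ngrams[i - window_size]` / `ngrams[i]` are always in range here, hence pyGetD)
def pvAWindow (ngrams : List (List String)) (w m : Int) : List Int → PySem.Dict (List String) Int → Bool
  | [], _ => false
  | i :: rest, window =>
      let old := PySem.List.pyGetD ngrams (i - w) []
      let window := window.insert old (window.getD old 0 - 1)
      let window := if window.getD old 0 == 0 then window.erase old else window
      let nw := PySem.List.pyGetD ngrams i []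
      let v := window.getD nw 0 + 1
      let window := window.insert nw v
      if m < v then true else pvAWindow ngrams w m rest window

def has_word_repetition_py (text : String) (ngram_size : Int) (max_repeats : Int) (window_size : Int) : Bool :=
  let words := PySem.Str.split₀ text
  if PySem.List.len words < ngram_size then false
  else
    let ngrams := pvNgrams words ngram_size
    if window_size ≤ 0 ∨ PySem.List.len ngrams ≤ window_size then
      pvAGlobal max_repeats ngrams PySem.Dict.empty
    else
      let window := PySem.Dict.counter (PySem.List.slice ngrams none (some window_size))
      if pvMaxGt window.values max_repeats then true
      else pvAWindow ngrams window_size max_repeats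
             (PySem.List.pyRange window_size (PySem.List.len ngrams) 1) window

-- ===== PORT B =====

-- `max(Counter(span).values()) > max_repeats` for one span
def pvSpanHit (span : List (List String)) (m : Int) : Bool :=
  pvMaxGt (PySem.Dict.counter span).values m

def has_word_repetition_py_alt (text : String) (ngram_size : Int) (max_repeats : Int) (window_size : Int) : Bool :=
  let words := PySem.Str.split₀ text
  if PySem.List.len words < ngram_size then false
  else
    let ngrams := pvNgrams words ngram_size
    let n := PySem.List.len ngrams
    let spans :=
      if 0 < window_size ∧ window_size < n then
        (PySem.List.pyRange 0 (n - window_size + 1) 1).map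
          (fun s => PySem.List.slice ngrams (some s) (some (s + window_size)))
      else [ngrams]
    spans.any (fun span => pvSpanHit span max_repeats)

-- ===== PRECONDITION & SPEC =====
def Spec_has_word_repetition_py (text : String) (ngram_size : Int) (max_repeats : Int) (window_size : Int) (out : Bool) : Prop := out = has_word_repetition_py_alt text ngram_size max_repeats window_size
instance (text : String) (ngram_size : Int) (max_repeats : Int) (window_size : Int) (out : Bool) : Decidable (Spec_has_word_repetition_py text ngram_size max_repeats window_size out) := by unfold Spec_has_word_repetition_py; infer_instance

-- ===== CLAIM (what is proved, stated in full; the proofs are below) =====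
def Claim_equal_has_word_repetition_py : Prop := ∀ (text : String) (ngram_size : Int) (max_repeats : Int) (window_size : Int), Dom_has_word_repetition_py text ngram_size max_repeats window_size → Spec_has_word_repetition_py text ngram_size max_repeats window_size (has_word_repetition_py text ngram_size max_repeats window_size)

-- ===== LEMMAS AND PROOFS =====

-- the contiguous segment L[a:b] (a b : Nat), the common currency of the proofs
def pvSeg (L : List (List String)) (a b : Nat) : List (List String) := (L.drop a).take (b - a)

lemma pvMaxGt_counter (l : List (List String)) (m : Int) :
    pvMaxGt (PySem.Dict.counter l).values m = true ↔ ∃ g ∈ l, m < (l.count g : Int) := by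
  have hv : (PySem.Dict.counter l).values = (PySem.Set.ofList l).map (fun k => (l.count k : Int)) := by
    simp [PySem.Dict.values, PySem.Dict.items_counter, Function.comp]
  unfold pvMaxGt
  rw [hv]
  cases hmax : PySem.List.max? ((PySem.Set.ofList l).map fun k => (l.count k : Int)) (fun v => v) with
  | none =>
    have hnil : (PySem.Set.ofList l).map (fun k => (l.count k : Int)) = [] :=
      (PySem.List.max?_eq_none_iff _ _).mp hmax
    have hl : l = [] := by
      cases l with
      | nil => rfl
      | cons x t =>
        exfalso
        have hx : x ∈ PySem.Set.ofList (x :: t) := (PySem.Set.mem_ofList _ _).mpr (by simp)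
        have : ((x :: t).count x : Int) ∈ (PySem.Set.ofList (x :: t)).map (fun k => (((x :: t).count k : Int))) :=
          List.mem_map_of_mem hx
        rw [hnil] at this
        exact (List.not_mem_nil) this
    simp [hl]
  | some v =>
    simp only [decide_eq_true_eq]
    constructor
    · intro hm
      obtain ⟨g, hg, hveq⟩ := List.mem_map.mp (PySem.List.max?_mem hmax)
      exact ⟨g, (PySem.Set.mem_ofList _ _).mp hg, hveq ▸ hm⟩
    · rintro ⟨g, hgl, hm⟩
      have hmem : (l.count g : Int) ∈ (PySem.Set.ofList l).map (fun k => (l.count k : Int)) :=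
        List.mem_map_of_mem ((PySem.Set.mem_ofList _ _).mpr hgl)
      have := PySem.List.max?_isMax hmax _ hmem
      omega

lemma pvAGlobal_iff (m : Int) (l : List (List String)) (d : PySem.Dict (List String) Int) :
    pvAGlobal m l d = true ↔ ∃ g ∈ l, m < d.getD g 0 + (l.count g : Int) := by
  induction l generalizing d with
  | nil => simp [pvAGlobal]
  | cons x rest ih =>
    simp only [pvAGlobal]
    by_cases hx : m < d.getD x 0 + 1
    · simp only [if_pos hx, true_iff]
      refine ⟨x, by simp, ?_⟩
      have hcnt : List.count x (x :: rest) = List.count x rest + 1 := List.count_cons_self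
      omega
    · rw [if_neg hx, ih]
      constructor
      · rintro ⟨g, hg, hc⟩
        by_cases hgx : g = x
        · subst hgx
          refine ⟨g, by simp, ?_⟩
          rw [PySem.Dict.getD_insert] at hc
          simp at hc
          have hcnt : List.count g (g :: rest) = List.count g rest + 1 := List.count_cons_self
          omega
        · refine ⟨g, by simp [hg], ?_⟩
          rw [PySem.Dict.getD_insert, if_neg hgx] at hc
          have hcnt : List.count g (x :: rest) = List.count g rest := List.count_cons_of_ne (Ne.symm hgx)
          omega
      · rintro ⟨g, hg, hc⟩
        by_cases hgx : g = x
        · subst hgx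
          have hcnt : List.count g (g :: rest) = List.count g rest + 1 := List.count_cons_self
          have hmem : g ∈ rest := by
            by_cases hr : g ∈ rest
            · exact hr
            · exfalso
              have h0 : List.count g rest = 0 := List.count_eq_zero.mpr hr
              omega
          refine ⟨g, hmem, ?_⟩
          rw [PySem.Dict.getD_insert, if_pos rfl]
          omega
        · have hmem : g ∈ rest := by
            rcases List.mem_cons.mp hg with h | h
            · exact absurd h hgx
            · exact h
          refine ⟨g, hmem, ?_⟩
          rw [PySem.Dict.getD_insert, if_neg hgx]
          have hcnt : List.count g (x :: rest) = List.count g rest := List.count_cons_of_ne (Ne.symm hgx)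
          omega

lemma pvDict_get?_erase {κ ν : Type} [BEq κ] [LawfulBEq κ] (d : PySem.Dict κ ν) (k k' : κ) :
    (d.erase k).get? k' = if k' == k then none else d.get? k' := by
  rcases d with ⟨items⟩
  simp only [PySem.Dict.erase, PySem.Dict.get?]
  induction items with
  | nil => simp
  | cons p t ih =>
    by_cases hpk : p.1 = k
    · by_cases hpk' : p.1 = k'
      · have hkk : k' = k := by rw [← hpk', hpk]
        subst hkk; subst hpk'
        simp [List.filter]
      · simp only [List.filter_cons, show (!(p.1 == k)) = false by simp [hpk],
          Bool.false_eq_true, if_false, ih]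
        rw [List.find?_cons_of_neg (by simp [hpk'])]
    · have hfil : (!(p.1 == k)) = true := by simp [hpk]
      simp only [List.filter_cons, hfil, if_true]
      by_cases hpk' : p.1 = k'
      · rw [List.find?_cons_of_pos (by simp [hpk']), List.find?_cons_of_pos (by simp [hpk'])]
        have hne : ¬ k' = k := fun h => hpk (hpk'.trans h)
        simp [hne]
      · rw [List.find?_cons_of_neg (by simp [hpk']), List.find?_cons_of_neg (by simp [hpk'])]
        exact ih

lemma pvDict_getD_erase {κ ν : Type} [BEq κ] [LawfulBEq κ] (d : PySem.Dict κ ν) (k k' : κ) (d0 : ν) :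
    (d.erase k).getD k' d0 = if k' == k then d0 else d.getD k' d0 := by
  simp only [PySem.Dict.getD, pvDict_get?_erase]
  by_cases h : k' = k <;> simp [h]

lemma pvSeg_count_le (L : List (List String)) (g : List String) {a b a' b' : Nat}
    (h1 : a' ≤ a) (h2 : b ≤ b') : (pvSeg L a b).count g ≤ (pvSeg L a' b').count g := by
  have heq : pvSeg L a b = ((pvSeg L a' b').drop (a - a')).take (b - a) := by
    unfold pvSeg
    rw [List.drop_take, List.drop_drop, List.take_take]
    congr 1
    · omega
    · congr 1; omega
  rw [heq]
  exact List.Sublist.count_le g ((List.take_sublist _ _).trans (List.drop_sublist _ _))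

lemma pvSeg_mem (L : List (List String)) {g : List String} {a b i : Nat}
    (hg : L[i]? = some g) (h1 : a ≤ i) (h2 : i < b) : g ∈ pvSeg L a b := by
  have hil : i < L.length := by
    by_contra h
    rw [List.getElem?_eq_none (by omega)] at hg
    cases hg
  have hidx : (pvSeg L a b)[i - a]? = some g := by
    unfold pvSeg
    rw [List.getElem?_take_of_lt (by omega), List.getElem?_drop]
    rwa [show a + (i - a) = i by omega]
  exact List.mem_of_getElem? hidx

lemma pvSeg_cons (L : List (List String)) (t W : Nat) (hW : 0 < W) (ht : t < L.length) :
    pvSeg L t (t + W) = L.getD t [] :: pvSeg L (t + 1) (t + W) := by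
  obtain ⟨W', rfl⟩ : ∃ W', W = W' + 1 := ⟨W - 1, by omega⟩
  unfold pvSeg
  rw [List.drop_eq_getElem_cons ht]
  rw [show t + (W' + 1) - t = W' + 1 by omega, show t + (W' + 1) - (t + 1) = W' by omega]
  rw [List.take_succ_cons]
  congr 1
  rw [List.getD_eq_getElem?_getD, List.getElem?_eq_getElem ht]
  rfl

lemma pvSeg_snoc (L : List (List String)) (t W : Nat) (hW : 0 < W) (ht : t + W < L.length) :
    pvSeg L (t + 1) (t + 1 + W) = pvSeg L (t + 1) (t + W) ++ [L.getD (t + W) []] := by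
  obtain ⟨W', rfl⟩ : ∃ W', W = W' + 1 := ⟨W - 1, by omega⟩
  unfold pvSeg
  rw [show t + 1 + (W' + 1) - (t + 1) = W' + 1 by omega, show t + (W' + 1) - (t + 1) = W' by omega]
  rw [List.take_add_one]
  congr 1
  rw [List.getElem?_drop, List.getElem?_eq_getElem (by omega)]
  rw [List.getD_eq_getElem?_getD, List.getElem?_eq_getElem (by omega : t + (W' + 1) < L.length)]
  simp [show t + 1 + W' = t + (W' + 1) by omega]

lemma pvAWindow_loop (L : List (List String)) (W : Nat) (m : Int) (hW : 0 < W) :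
    ∀ (fuel t : Nat) (d : PySem.Dict (List String) Int),
      fuel = L.length - (t + W) → t + W ≤ L.length →
      (∀ g, d.getD g 0 = ((pvSeg L t (t + W)).count g : Int)) →
      (pvAWindow L (W : Int) m (PySem.List.pyRange ((t : Int) + (W : Int)) (PySem.List.len L) 1) d = true
        ↔ ∃ i : Nat, t + W ≤ i ∧ i < L.length ∧
            m < ((pvSeg L (i + 1 - W) (i + 1)).count (L.getD i []) : Int)) := by
  intro fuel
  induction fuel with
  | zero =>
    intro t d hfuel hle hinv
    have hlen : t + W = L.length := by omega
    rw [PySem.List.pyRange_one_eq_nil (by rw [PySem.List.len_eq]; omega)]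
    simp only [pvAWindow, Bool.false_eq_true, false_iff]
    rintro ⟨i, h1, h2, _⟩
    omega
  | succ f ih =>
    intro t d hfuel hle hinv
    have hlt : t + W < L.length := by omega
    rw [PySem.List.pyRange_one_cons (by rw [PySem.List.len_eq]; omega)]
    simp only [pvAWindow]
    have hold : PySem.List.pyGetD L ((t : Int) + (W : Int) - (W : Int)) [] = L.getD t [] := by
      rw [show (t : Int) + (W : Int) - (W : Int) = ((t : Nat) : Int) by ring]
      exact PySem.List.pyGetD_natCast L t []
    have hnew : PySem.List.pyGetD L ((t : Int) + (W : Int)) [] = L.getD (t + W) [] := by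
      rw [show (t : Int) + (W : Int) = (((t + W : Nat)) : Int) by push_cast; ring]
      exact PySem.List.pyGetD_natCast L (t + W) []
    rw [hold, hnew]
    set old := L.getD t [] with hold_def
    set nw := L.getD (t + W) [] with hnw_def
    set mid := pvSeg L (t + 1) (t + W) with hmid_def
    have hcons : pvSeg L t (t + W) = old :: mid := pvSeg_cons L t W hW (by omega)
    have hsnoc : pvSeg L (t + 1) (t + 1 + W) = mid ++ [nw] := pvSeg_snoc L t W hW hlt
    have h1 : ∀ g, (d.insert old (d.getD old 0 - 1)).getD g 0 = (mid.count g : Int) := by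
      intro g
      rw [PySem.Dict.getD_insert]
      by_cases hg : g = old
      · rw [if_pos hg, hg]
        have hvv := hinv old
        rw [hcons, List.count_cons_self] at hvv
        push_cast at hvv ⊢
        omega
      · rw [if_neg hg]
        have hvv := hinv g
        rwa [hcons, List.count_cons_of_ne (Ne.symm hg)] at hvv
    set d1 := d.insert old (d.getD old 0 - 1) with hd1_def
    have h2 : ∀ g, (if d1.getD old 0 == 0 then d1.erase old else d1).getD g 0 = (mid.count g : Int) := by
      intro g
      split
      · next hz =>
        rw [pvDict_getD_erase]
        by_cases hg : g = old
        · rw [if_pos (by simp [hg])]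
          have := h1 old
          simp only [beq_iff_eq] at hz
          rw [hz] at this
          rw [hg]
          omega
        · rw [if_neg (by simp [hg])]
          exact h1 g
      · exact h1 g
    set d2 := if d1.getD old 0 == 0 then d1.erase old else d1 with hd2_def
    have h3 : d2.getD nw 0 + 1 = ((pvSeg L (t + 1) (t + 1 + W)).count nw : Int) := by
      rw [hsnoc, List.count_append, h2]
      simp
    have h4 : ∀ g, (d2.insert nw (d2.getD nw 0 + 1)).getD g 0 = ((pvSeg L (t + 1) (t + 1 + W)).count g : Int) := by
      intro g
      rw [PySem.Dict.getD_insert]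
      by_cases hg : g = nw
      · rw [if_pos hg, hg]
        exact h3
      · rw [if_neg hg, hsnoc, List.count_append, h2]
        have hz : List.count g [nw] = 0 := by
          rw [List.count_singleton]
          simp only [beq_iff_eq]
          exact if_neg (fun h => hg (Eq.symm h))
        simp [hz]
    by_cases hv : m < d2.getD nw 0 + 1
    · rw [if_pos hv]
      simp only [true_iff]
      refine ⟨t + W, le_refl _, hlt, ?_⟩
      rw [show t + W + 1 - W = t + 1 by omega, show t + W + 1 = t + 1 + W by omega,
        ← hnw_def, ← h3]
      exact hv
    · rw [if_neg hv]
      have harg : (t : Int) + (W : Int) + 1 = ((t + 1 : Nat) : Int) + ((W : Nat) : Int) := by push_cast; ring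
      rw [harg]
      rw [ih (t + 1) _ (by omega) (by omega) h4]
      constructor
      · rintro ⟨i, hi1, hi2, hi3⟩
        exact ⟨i, by omega, hi2, hi3⟩
      · rintro ⟨i, hi1, hi2, hi3⟩
        by_cases hieq : i = t + W
        · exfalso
          subst hieq
          rw [show t + W + 1 - W = t + 1 by omega, show t + W + 1 = t + 1 + W by omega, ← hnw_def] at hi3
          rw [← h3] at hi3
          exact hv hi3
        · exact ⟨i, by omega, hi2, hi3⟩

lemma pvLastOcc {α : Type} [DecidableEq α] (g : α) :
    ∀ (l : List α), g ∈ l → ∃ j, j < l.length ∧ l[j]? = some g ∧ ∀ k, j < k → l[k]? ≠ some g := by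
  intro l
  induction l with
  | nil => intro h; cases h
  | cons x t ih =>
    intro hmem
    by_cases hgt : g ∈ t
    · obtain ⟨j, hj1, hj2, hj3⟩ := ih hgt
      refine ⟨j + 1, by simpa using hj1, by simpa using hj2, ?_⟩
      intro k hk
      obtain ⟨k', rfl⟩ : ∃ k', k = k' + 1 := ⟨k - 1, by omega⟩
      simpa using hj3 k' (by omega)
    · have hgx : g = x := by
        rcases List.mem_cons.mp hmem with h | h
        · exact h
        · exact absurd h hgt
      refine ⟨0, by simp, by simp [hgx], ?_⟩
      intro k hk hcon
      obtain ⟨k', rfl⟩ : ∃ k', k = k' + 1 := ⟨k - 1, by omega⟩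
      simp only [List.getElem?_cons_succ] at hcon
      exact hgt (List.mem_of_getElem? hcon)

lemma pvBridge (L : List (List String)) (m : Int) (W : Nat) (hW : 0 < W) (hn : W ≤ L.length) :
    ((∃ g ∈ pvSeg L 0 W, m < ((pvSeg L 0 W).count g : Int)) ∨
      (∃ i : Nat, W ≤ i ∧ i < L.length ∧
        m < ((pvSeg L (i + 1 - W) (i + 1)).count (L.getD i []) : Int)))
    ↔ ∃ s : Nat, s + W ≤ L.length ∧ ∃ g ∈ pvSeg L s (s + W), m < ((pvSeg L s (s + W)).count g : Int) := by
  constructor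
  · rintro (⟨g, hmem, hcnt⟩ | ⟨i, hi1, hi2, hcnt⟩)
    · exact ⟨0, by omega, g, by simpa using hmem, by simpa using hcnt⟩
    · refine ⟨i + 1 - W, by omega, L.getD i [], ?_, ?_⟩
      · have hgi : L[i]? = some (L.getD i []) := by
          rw [List.getD_eq_getElem?_getD, List.getElem?_eq_getElem hi2]
          rfl
        exact pvSeg_mem L hgi (by omega) (by omega)
      · rwa [show i + 1 - W + W = i + 1 by omega]
  · rintro ⟨s, hsW, g, hmem, hcnt⟩
    set l := pvSeg L s (s + W) with hl_def
    obtain ⟨j, hj1, hj2, hj3⟩ := pvLastOcc g l hmem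
    have hllen : l.length = W := by
      rw [hl_def]
      unfold pvSeg
      rw [List.length_take, List.length_drop]
      omega
    have hjW : j < W := by omega
    have hgi : L[s + j]? = some g := by
      rw [← hj2, hl_def]
      unfold pvSeg
      rw [show s + W - s = W by omega, List.getElem?_take_of_lt hjW, List.getElem?_drop]
    have hdrop0 : (l.drop (j + 1)).count g = 0 := by
      rw [List.count_eq_zero]
      intro hmem'
      obtain ⟨k, hk, hkeq⟩ := List.getElem_of_mem hmem'
      have : l[j + 1 + k]? = some g := by
        rw [← List.getElem?_drop, List.getElem?_eq_getElem hk, hkeq]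
      exact hj3 (j + 1 + k) (by omega) this
    have hcount_take : l.count g = (l.take (j + 1)).count g := by
      conv_lhs => rw [← List.take_append_drop (j + 1) l]
      rw [List.count_append, hdrop0]
      omega
    have htake : l.take (j + 1) = pvSeg L s (s + j + 1) := by
      rw [hl_def]
      unfold pvSeg
      rw [List.take_take]
      congr 1
      omega
    by_cases hpW : s + j < W
    · left
      refine ⟨g, pvSeg_mem L hgi (by omega) (by omega), ?_⟩
      have hle := pvSeg_count_le L g (a := s) (b := s + j + 1) (a' := 0) (b' := W) (by omega) (by omega)
      rw [← htake, ← hcount_take] at hle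
      omega
    · right
      refine ⟨s + j, by omega, by omega, ?_⟩
      have hgd : L.getD (s + j) [] = g := by
        rw [List.getD_eq_getElem?_getD, hgi]
        rfl
      rw [hgd]
      have hle := pvSeg_count_le L g (a := s) (b := s + j + 1) (a' := s + j + 1 - W) (b' := s + j + 1) (by omega) (by omega)
      rw [← htake, ← hcount_take] at hle
      omega

-- ===== VERDICT (by name: the statement is the Claim_ definition above) =====
theorem has_word_repetition_py_spec : Claim_equal_has_word_repetition_py := by
  intro text k m w _dom
  unfold Spec_has_word_repetition_py
  unfold has_word_repetition_py has_word_repetition_py_alt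
  set words := PySem.Str.split₀ text with hwords
  by_cases h0 : PySem.List.len words < k
  · simp only [if_pos h0]
  · simp only [if_neg h0]
    set L := pvNgrams words k with hL
    have hlen : PySem.List.len L = (L.length : Int) := PySem.List.len_eq L
    by_cases hbc : 0 < w ∧ w < PySem.List.len L
    · -- window case
      have hA : ¬ (w ≤ 0 ∨ PySem.List.len L ≤ w) := by omega
      rw [if_neg hA, if_pos hbc]
      set W := w.toNat with hWdef
      have hWpos : 0 < W := by omega
      have hWlt : W < L.length := by omega
      have hslice0 : PySem.List.slice L none (some w) = pvSeg L 0 W := by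
        rw [PySem.List.slice_to L (by omega)]
        unfold pvSeg
        simp [hWdef]
      rw [hslice0, Bool.eq_iff_iff]
      -- LHS: initial max-check OR the sliding loop
      have hLHS : (if pvMaxGt (PySem.Dict.counter (pvSeg L 0 W)).values m then true
          else pvAWindow L w m (PySem.List.pyRange w (PySem.List.len L) 1)
                 (PySem.Dict.counter (pvSeg L 0 W))) = true
          ↔ (pvMaxGt (PySem.Dict.counter (pvSeg L 0 W)).values m = true
             ∨ pvAWindow L w m (PySem.List.pyRange w (PySem.List.len L) 1)
                 (PySem.Dict.counter (pvSeg L 0 W)) = true) := by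
        by_cases hinit : pvMaxGt (PySem.Dict.counter (pvSeg L 0 W)).values m = true
        · simp [hinit]
        · simp [hinit]
      rw [hLHS]
      have hwW : w = ((W : Nat) : Int) := by omega
      have hloop := pvAWindow_loop L W m hWpos (L.length - (0 + W)) 0
        (PySem.Dict.counter (pvSeg L 0 W)) rfl (by omega)
        (by
          intro g
          rw [PySem.Dict.getD_counter]
          norm_num)
      rw [show ((0 : Nat) : Int) + ((W : Nat) : Int) = ((W : Nat) : Int) by simp] at hloop
      rw [show (0 : Nat) + W = W by simp] at hloop
      rw [hwW, hloop, pvMaxGt_counter]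
      rw [pvBridge L m W hWpos (by omega)]
      -- RHS: any over all the window slices
      rw [List.any_eq_true]
      constructor
      · rintro ⟨s, hs, g, hg, hcnt⟩
        refine ⟨PySem.List.slice L (some (s : Int)) (some ((s : Int) + ((W : Nat) : Int))), ?_, ?_⟩
        · apply List.mem_map_of_mem
          rw [PySem.List.mem_pyRange_one]
          omega
        · have hsl : PySem.List.slice L (some (s : Int)) (some ((s : Int) + ((W : Nat) : Int))) = pvSeg L s (s + W) := by
            rw [PySem.List.slice_toNat L (by omega) (by omega)]
            unfold pvSeg
            rw [show ((s : Int)).toNat = s by omega,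
              show ((s : Int) + ((W : Nat) : Int)).toNat = s + W by omega]
          rw [hsl]
          unfold pvSpanHit
          rw [pvMaxGt_counter]
          exact ⟨g, hg, hcnt⟩
      · rintro ⟨span, hspan, hhit⟩
        obtain ⟨sI, hsI, rfl⟩ := List.mem_map.mp hspan
        rw [PySem.List.mem_pyRange_one] at hsI
        have hsl : PySem.List.slice L (some sI) (some (sI + ((W : Nat) : Int))) = pvSeg L sI.toNat (sI.toNat + W) := by
          rw [PySem.List.slice_toNat L (by omega) (by omega)]
          unfold pvSeg
          rw [show (sI + ((W : Nat) : Int)).toNat = sI.toNat + W by omega]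
        rw [hsl] at hhit
        unfold pvSpanHit at hhit
        rw [pvMaxGt_counter] at hhit
        obtain ⟨g, hg, hcnt⟩ := hhit
        exact ⟨sI.toNat, by omega, g, hg, hcnt⟩
    · -- global case
      have hA : w ≤ 0 ∨ PySem.List.len L ≤ w := by omega
      rw [if_pos hA, if_neg hbc, Bool.eq_iff_iff]
      rw [pvAGlobal_iff]
      simp only [List.any_cons, List.any_nil, Bool.or_false]
      unfold pvSpanHit
      rw [pvMaxGt_counter]
      constructor
      · rintro ⟨g, hg, hc⟩
        refine ⟨g, hg, ?_⟩
        rw [PySem.Dict.getD_empty] at hc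
        omega
      · rintro ⟨g, hg, hc⟩
        refine ⟨g, hg, ?_⟩
        rw [PySem.Dict.getD_empty]
        omega
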